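-- pv_equiv track=rewrite | github.com/rusteth/launchpad_tickets | main.py | winning_tickets
-- ===== SOURCE A (Python) =====
-- def winning_tickets(ticket_numbers, winning_ends):
--     winning_tickets = []
--
--     for line in ticket_numbers:
--         tickets_in_line = line.split()  # Разделение строки на отдельные билеты
--         for ticket in tickets_in_line:
--             for end in winning_ends:
--                 if ticket.endswith(str(end)):  # Проверка, заканчивается ли билет на выигрышное число
--                     winning_tickets.append(ticket)
--                     break  # Если нашли совпадение, переходим к следующему билету
--     return winning_tickets
-- ===== SOURCE B (Python) =====
-- def winning_tickets(ticket_numbers, winning_ends):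
--     ends = {str(e) for e in winning_ends}
--     return [ticket
--             for line in ticket_numbers
--             for ticket in line.split()
--             if any(ticket[i:] in ends for i in range(len(ticket) + 1))]
-- ===== Notes on version B (the rewrite author's own statement) =====
-- stated objective: faster
-- what changed: B builds a hash set of the winning-end strings once and decides each ticket by testing whether any of its suffixes is in that set, replacing A's per-ticket scan over winning_ends with endswith; the nested accumulator loops become one comprehension.
import Mathlib
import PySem

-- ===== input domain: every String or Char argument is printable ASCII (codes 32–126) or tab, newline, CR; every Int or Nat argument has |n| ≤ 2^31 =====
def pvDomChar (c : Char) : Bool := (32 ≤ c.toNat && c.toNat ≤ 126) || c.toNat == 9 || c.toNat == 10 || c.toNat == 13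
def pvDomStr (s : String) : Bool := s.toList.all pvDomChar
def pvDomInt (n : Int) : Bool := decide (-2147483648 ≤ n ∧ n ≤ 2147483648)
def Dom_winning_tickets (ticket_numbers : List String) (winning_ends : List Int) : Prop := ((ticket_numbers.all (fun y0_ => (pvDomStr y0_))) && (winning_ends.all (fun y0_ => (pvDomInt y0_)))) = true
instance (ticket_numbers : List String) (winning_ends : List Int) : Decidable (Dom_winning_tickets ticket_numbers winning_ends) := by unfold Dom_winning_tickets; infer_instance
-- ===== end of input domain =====

-- B replaces A's nested endswith scan over winning_ends by one suffix-membership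
-- test against a set of the winning-end strings (alternative decomposition; return value only).

-- ===== PORT A =====
-- A's innermost 'for end in winning_ends: … break' — true as soon as ticket.endswith(str(end))
def wtEndsLoop (ticket : String) : List Int → Bool
  | [] => false
  | e :: rest =>
      if PySem.Str.endswith ticket (PySem.Int.toStr e) then true
      else wtEndsLoop ticket rest

def winning_tickets (ticket_numbers : List String) (winning_ends : List Int) : List String :=
  ticket_numbers.foldl (fun acc line =>
    (PySem.Str.split₀ line).foldl
      (fun acc2 t => if wtEndsLoop t winning_ends then acc2 ++ [t] else acc2) acc) []

-- ===== PORT B =====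
-- any(ticket[i:] in ends for i in range(len(ticket) + 1))
def wtHit (ends : PySem.Set String) (t : String) : Bool :=
  (PySem.List.pyRange 0 (PySem.Str.len t + 1) 1).any
    (fun i => PySem.Set.contains ends (PySem.Str.slice t (some i) none))

def winning_tickets_alt (ticket_numbers : List String) (winning_ends : List Int) : List String :=
  let ends : PySem.Set String := PySem.Set.ofList (winning_ends.map PySem.Int.toStr)
  ticket_numbers.flatMap (fun line => (PySem.Str.split₀ line).filter (wtHit ends))

-- ===== PRECONDITION & SPEC =====
def Spec_winning_tickets (ticket_numbers : List String) (winning_ends : List Int) (out : List String) : Prop := out = winning_tickets_alt ticket_numbers winning_ends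
instance (ticket_numbers : List String) (winning_ends : List Int) (out : List String) : Decidable (Spec_winning_tickets ticket_numbers winning_ends out) := by unfold Spec_winning_tickets; infer_instance

-- ===== CLAIM (what is proved, stated in full; the proofs are below) =====
def Claim_equal_winning_tickets : Prop := ∀ (ticket_numbers : List String) (winning_ends : List Int), Dom_winning_tickets ticket_numbers winning_ends → Spec_winning_tickets ticket_numbers winning_ends (winning_tickets ticket_numbers winning_ends)

-- ===== LEMMAS AND PROOFS =====

-- A's break-loop is 'any endswith'
theorem wtEndsLoop_eq_any (t : String) (wes : List Int) :
    wtEndsLoop t wes = wes.any (fun e => PySem.Str.endswith t (PySem.Int.toStr e)) := by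
  induction wes with
  | nil => rfl
  | cons e rest ih =>
      simp only [wtEndsLoop, List.any_cons]
      rw [ih]
      cases PySem.Str.endswith t (PySem.Int.toStr e) <;> simp

-- per-ticket agreement of the two tests
theorem wtEndsLoop_eq_wtHit (t : String) (wes : List Int) :
    wtEndsLoop t wes = wtHit (PySem.Set.ofList (wes.map PySem.Int.toStr)) t := by
  rw [wtEndsLoop_eq_any, Bool.eq_iff_iff]
  simp only [wtHit, List.any_eq_true, PySem.List.mem_pyRange_one,
    PySem.Set.contains_iff, PySem.Set.mem_ofList, List.mem_map]
  have hlen : PySem.Str.len t = (t.toList.length : Int) := by simp [PySem.Str.len]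
  constructor
  · rintro ⟨e, he, hend⟩
    have hsuf : (PySem.Int.toStr e).toList <:+ t.toList := by
      simpa [PySem.Chars.endswith_iff] using hend
    obtain ⟨pre, hp⟩ := hsuf
    have hle : pre.length ≤ t.toList.length := by simp [← hp]
    refine ⟨(pre.length : Int), ⟨Int.natCast_nonneg _, by omega⟩, e, he, ?_⟩
    apply String.toList_inj.mp
    simp [PySem.List.slice_from_natCast, ← hp]
  · rintro ⟨i, ⟨h0, _⟩, e, he, heq⟩
    refine ⟨e, he, ?_⟩
    have : (PySem.Int.toStr e).toList <:+ t.toList := by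
      rw [heq]
      simp [PySem.List.slice_from _ h0]
      exact List.drop_suffix _ _
    simpa [PySem.Chars.endswith_iff] using this

theorem winning_tickets_spec : Claim_equal_winning_tickets := by
  intro tns wes _
  unfold Spec_winning_tickets
  simp only [winning_tickets, winning_tickets_alt,
    PySem.List.foldl_append_if_eq_filter, PySem.List.foldl_append_eq_flatMap,
    List.nil_append, wtEndsLoop_eq_wtHit]
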